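-- pv_equiv track=rewrite | github.com/freedeaths/mathbox-py | mathbox/app/signal/outlier.py | simple_outlier
-- ===== SOURCE A (Python) =====
-- def simple_outlier(series, bias=3):
--     sorted_series = sorted(series)
--     length = len(series)
--     q3 = sorted_series[int(length * 0.75)]
--     q1 = sorted_series[int(length * 0.25)]
--     outlier_lo = [(i,x) for i,x in enumerate(series) if x < q1 - bias * (q3 - q1)]
--     outlier_hi = [(i,x) for i,x in enumerate(series) if x > q3 + bias * (q3 - q1)]
--     return outlier_lo, outlier_hi
-- ===== SOURCE B (Python) =====
-- def _select(xs, k):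
--     # k-th smallest (0-based) element of xs, by iterative quickselect
--     while True:
--         p = xs[0]
--         lt = [x for x in xs if x < p]
--         if k < len(lt):
--             xs = lt
--             continue
--         eq = sum(1 for x in xs if x == p)
--         if k < len(lt) + eq:
--             return p
--         xs = [x for x in xs if x > p]
--         k -= len(lt) + eq
--
--
-- def simple_outlier(series, bias=3):
--     n = len(series)
--     q1 = _select(list(series), n // 4)
--     q3 = _select(list(series), (3 * n) // 4)
--     lo = q1 - bias * (q3 - q1)
--     hi = q3 + bias * (q3 - q1)
--     outlier_lo = []
--     outlier_hi = []
--     for i, x in enumerate(series):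
--         if x < lo:
--             outlier_lo.append((i, x))
--         if x > hi:
--             outlier_hi.append((i, x))
--     return outlier_lo, outlier_hi
-- ===== Notes on version B (the rewrite author's own statement) =====
-- stated objective: faster
-- what changed: B replaces the full sort with quickselect for the two quantile positions and fuses the two comprehension passes into one loop that fills both outlier lists.
import Mathlib
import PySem

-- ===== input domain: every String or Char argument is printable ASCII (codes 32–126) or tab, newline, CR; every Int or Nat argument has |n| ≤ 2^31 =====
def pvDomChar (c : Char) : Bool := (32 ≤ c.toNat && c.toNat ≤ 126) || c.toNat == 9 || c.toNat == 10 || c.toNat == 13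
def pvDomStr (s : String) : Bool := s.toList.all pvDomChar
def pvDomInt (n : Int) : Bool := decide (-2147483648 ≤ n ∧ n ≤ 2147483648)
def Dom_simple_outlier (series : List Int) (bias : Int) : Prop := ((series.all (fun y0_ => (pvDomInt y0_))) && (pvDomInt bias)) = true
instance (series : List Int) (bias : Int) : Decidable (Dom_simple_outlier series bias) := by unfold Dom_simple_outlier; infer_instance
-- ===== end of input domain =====

-- B replaces the full sort with quickselect for the two quantile positions and fuses the
-- two filtering passes into one loop (objective: faster).

-- ===== PORT A =====
-- int(length * 0.75) / int(length * 0.25): 0.75 and 0.25 are exact binary floats and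
-- length ≤ 2^31, so the products are exact and truncation gives 3*length/4 and length/4
-- (Nat division); ported with that arithmetic, which is exact on the stated domain.
def simple_outlier (series : List Int) (bias : Int) : (List (Int × Int)) × (List (Int × Int)) :=
  let sorted_series := PySem.List.sorted series (fun x => x) false
  let length := series.length
  match PySem.List.pyGet? sorted_series ((3 * length / 4 : Nat) : Int),
        PySem.List.pyGet? sorted_series ((length / 4 : Nat) : Int) with
  | some q3, some q1 =>
      ((PySem.List.enumerate series 0).filter (fun ix => decide (ix.2 < q1 - bias * (q3 - q1))),
       (PySem.List.enumerate series 0).filter (fun ix => decide (ix.2 > q3 + bias * (q3 - q1))))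
  | _, _ => ([], [])   -- unreachable under Pre_: Python raises IndexError on the empty list

-- ===== PORT B =====
-- quickselect loop of Source B's _select; the [] case is where the Python raises IndexError
-- (unreachable under Pre_)
def pvSel : List Int → Nat → Int
  | [], _ => 0
  | p :: rest, k =>
    if k < ((p :: rest).filter (fun x => decide (x < p))).length then
      pvSel ((p :: rest).filter (fun x => decide (x < p))) k
    else if k < ((p :: rest).filter (fun x => decide (x < p))).length
              + ((p :: rest).filter (fun x => decide (x = p))).length then p
    else pvSel ((p :: rest).filter (fun x => decide (p < x)))
          (k - (((p :: rest).filter (fun x => decide (x < p))).length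
              + ((p :: rest).filter (fun x => decide (x = p))).length))
termination_by xs _ => xs.length
decreasing_by
  · exact List.length_filter_lt_length_iff_exists.mpr ⟨p, List.mem_cons_self .., by simp⟩
  · exact List.length_filter_lt_length_iff_exists.mpr ⟨p, List.mem_cons_self .., by simp⟩

def simple_outlier_alt (series : List Int) (bias : Int) : (List (Int × Int)) × (List (Int × Int)) :=
  let n := series.length
  let q1 := pvSel series (n / 4)
  let q3 := pvSel series (3 * n / 4)
  let lo := q1 - bias * (q3 - q1)
  let hi := q3 + bias * (q3 - q1)
  (PySem.List.enumerate series 0).foldl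
    (fun acc ix =>
      (if ix.2 < lo then acc.1 ++ [ix] else acc.1,
       if ix.2 > hi then acc.2 ++ [ix] else acc.2))
    ([], [])

-- ===== PRECONDITION & SPEC =====
-- Python A raises IndexError on the empty list (sorted_series[0]); excluded.
def Pre_simple_outlier (series : List Int) (bias : Int) : Prop := series ≠ []
instance (series : List Int) (bias : Int) : Decidable (Pre_simple_outlier series bias) := by unfold Pre_simple_outlier; infer_instance
def pvWitness_simple_outlier : List Int × Int := ([1, 2, 3, 100], 1)

def Spec_simple_outlier (series : List Int) (bias : Int) (out : (List (Int × Int)) × (List (Int × Int))) : Prop := out = simple_outlier_alt series bias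
instance (series : List Int) (bias : Int) (out : (List (Int × Int)) × (List (Int × Int))) : Decidable (Spec_simple_outlier series bias out) := by unfold Spec_simple_outlier; infer_instance

-- ===== CLAIM (what is proved, stated in full; the proofs are below) =====
def Claim_equal_simple_outlier : Prop := ∀ (series : List Int) (bias : Int), Dom_simple_outlier series bias → Pre_simple_outlier series bias → Spec_simple_outlier series bias (simple_outlier series bias)

-- ===== LEMMAS AND PROOFS =====

-- sorted(xs) splits, around any pivot p, into sorted(<p) ++ (elements = p) ++ sorted(>p)
theorem pv_sort_split (p : Int) (xs : List Int) :
    PySem.List.sorted xs (fun x => x) false =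
      PySem.List.sorted (xs.filter (fun x => decide (x < p))) (fun x => x) false
        ++ xs.filter (fun x => decide (x = p))
        ++ PySem.List.sorted (xs.filter (fun x => decide (p < x))) (fun x => x) false := by
  have h1 : (xs.filter (fun x => !decide (x < p))).filter (fun x => decide (x = p))
      = xs.filter (fun x => decide (x = p)) := by
    rw [List.filter_filter]
    apply List.filter_congr
    intro x _
    by_cases hx : x = p <;> simp [hx]
  have h3 : (xs.filter (fun x => !decide (x < p))).filter (fun x => !decide (x = p))
      = xs.filter (fun x => decide (p < x)) := by
    rw [List.filter_filter]
    apply List.filter_congr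
    intro x _
    by_cases hx : p < x <;> by_cases hy : x = p <;> simp [hx, hy] <;> omega
  apply PySem.List.sorted_id_eq_of_perm_of_pairwise
  · have plt := PySem.List.sorted_perm (xs.filter (fun x => decide (x < p))) (fun x : Int => x) false
    have pgt := PySem.List.sorted_perm (xs.filter (fun x => decide (p < x))) (fun x : Int => x) false
    have hm : ((xs.filter (fun x => decide (x = p)))
          ++ xs.filter (fun x => decide (p < x))).Perm
        (xs.filter (fun x => !decide (x < p))) := by
      rw [← h1, ← h3]
      exact List.filter_append_perm _ _
    have step1 := plt.append ((List.Perm.refl (xs.filter (fun x => decide (x = p)))).append pgt)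
    have step2 := (List.Perm.refl (xs.filter (fun x => decide (x < p)))).append hm
    have step3 := List.filter_append_perm (fun x => decide (x < p)) xs
    rw [List.append_assoc]
    exact step1.trans (step2.trans step3)
  · have mlt : ∀ a ∈ PySem.List.sorted (xs.filter (fun x => decide (x < p))) (fun x : Int => x) false, a < p := by
      intro a ha
      have h := (PySem.List.mem_sorted _ _ _ _).mp ha
      simp only [List.mem_filter, decide_eq_true_eq] at h
      exact h.2
    have meq : ∀ a ∈ xs.filter (fun x => decide (x = p)), a = p := by
      intro a ha
      simp only [List.mem_filter, decide_eq_true_eq] at ha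
      exact ha.2
    have mgt : ∀ a ∈ PySem.List.sorted (xs.filter (fun x => decide (p < x))) (fun x : Int => x) false, p < a := by
      intro a ha
      have h := (PySem.List.mem_sorted _ _ _ _).mp ha
      simp only [List.mem_filter, decide_eq_true_eq] at h
      exact h.2
    rw [List.append_assoc, List.pairwise_append, List.pairwise_append]
    refine ⟨PySem.List.sorted_pairwise _ _, ⟨?_, PySem.List.sorted_pairwise _ _, ?_⟩, ?_⟩
    · exact List.pairwise_of_forall_mem_list (fun a ha b hb => by rw [meq a ha, meq b hb])
    · intro a ha b hb
      have e := meq a ha; have g := mgt b hb; omega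
    · intro a ha b hb
      have l := mlt a ha
      rcases List.mem_append.mp hb with hb | hb
      · have e := meq b hb; omega
      · have g := mgt b hb; omega

-- quickselect returns the k-th element of the Python-sorted list
theorem pvSel_eq : ∀ (n : Nat) (xs : List Int) (k : Nat), xs.length ≤ n → k < xs.length →
    pvSel xs k = (PySem.List.sorted xs (fun x => x) false).getD k 0 := by
  intro n
  induction n with
  | zero => intro xs k hle hk; omega
  | succ n ih =>
    intro xs k hle hk
    match xs with
    | [] => simp at hk
    | p :: rest =>
      have hsplit := pv_sort_split p (p :: rest)
      have hsum : ((p :: rest).filter (fun x => decide (x < p))).length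
          + ((p :: rest).filter (fun x => decide (x = p))).length
          + ((p :: rest).filter (fun x => decide (p < x))).length = (p :: rest).length := by
        have hc := congrArg List.length hsplit
        simp only [List.length_append, PySem.List.length_sorted] at hc
        omega
      have hltlen : ((p :: rest).filter (fun x => decide (x < p))).length < (p :: rest).length :=
        List.length_filter_lt_length_iff_exists.mpr ⟨p, List.mem_cons_self .., by simp⟩
      have hgtlen : ((p :: rest).filter (fun x => decide (p < x))).length < (p :: rest).length :=
        List.length_filter_lt_length_iff_exists.mpr ⟨p, List.mem_cons_self .., by simp⟩
      rw [pvSel]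
      by_cases h1 : k < ((p :: rest).filter (fun x => decide (x < p))).length
      · rw [if_pos h1, hsplit, List.append_assoc,
          List.getD_append _ _ _ _ (by rw [PySem.List.length_sorted]; exact h1)]
        exact ih _ k (by simp at hle hltlen ⊢; omega) h1
      · rw [if_neg h1]
        by_cases h2 : k < ((p :: rest).filter (fun x => decide (x < p))).length
            + ((p :: rest).filter (fun x => decide (x = p))).length
        · have hA : (PySem.List.sorted ((p :: rest).filter (fun x => decide (x < p))) (fun x : Int => x) false).length ≤ k := by
            rw [PySem.List.length_sorted]; omega
          have hB : k - (PySem.List.sorted ((p :: rest).filter (fun x => decide (x < p))) (fun x : Int => x) false).length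
              < ((p :: rest).filter (fun x => decide (x = p))).length := by
            rw [PySem.List.length_sorted]; omega
          rw [if_pos h2, hsplit, List.append_assoc,
            List.getD_append_right _ _ _ _ hA,
            List.getD_append _ _ _ _ hB,
            List.getD_eq_getElem _ _ hB]
          have hmem := List.getElem_mem hB
          simp only [List.mem_filter, decide_eq_true_eq] at hmem
          exact hmem.2.symm
        · have hC : (PySem.List.sorted ((p :: rest).filter (fun x => decide (x < p))) (fun x : Int => x) false
                ++ (p :: rest).filter (fun x => decide (x = p))).length ≤ k := by
            simp only [List.length_append, PySem.List.length_sorted]; omega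
          rw [if_neg h2, hsplit, List.getD_append_right _ _ _ _ hC]
          have harith : k - (PySem.List.sorted ((p :: rest).filter (fun x => decide (x < p))) (fun x => x) false
                ++ (p :: rest).filter (fun x => decide (x = p))).length
              = k - (((p :: rest).filter (fun x => decide (x < p))).length
                  + ((p :: rest).filter (fun x => decide (x = p))).length) := by
            simp only [List.length_append, PySem.List.length_sorted]
          rw [harith]
          exact ih _ _ (by simp at hle hgtlen ⊢; omega) (by omega)

-- the fused loop with two accumulators is the pair of filters
theorem pv_foldl_pair (lo hi : Int) : ∀ (l : List (Int × Int)) (a b : List (Int × Int)),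
    l.foldl (fun acc ix => (if ix.2 < lo then acc.1 ++ [ix] else acc.1,
                            if ix.2 > hi then acc.2 ++ [ix] else acc.2)) (a, b)
      = (a ++ l.filter (fun ix => decide (ix.2 < lo)), b ++ l.filter (fun ix => decide (ix.2 > hi)))
  | [], a, b => by simp
  | x :: l, a, b => by
    simp only [List.foldl_cons, List.filter_cons]
    rw [pv_foldl_pair lo hi l]
    by_cases h1 : x.2 < lo <;> by_cases h2 : x.2 > hi <;> simp [h1, h2]

theorem simple_outlier_spec : Claim_equal_simple_outlier := by
  unfold Claim_equal_simple_outlier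
  intro series bias _ hpre
  unfold Spec_simple_outlier simple_outlier simple_outlier_alt
  have hn : 0 < series.length := List.length_pos_of_ne_nil hpre
  have h34 : 3 * series.length / 4 < (PySem.List.sorted series (fun x => x) false).length := by
    rw [PySem.List.length_sorted]; omega
  have h14 : series.length / 4 < (PySem.List.sorted series (fun x => x) false).length := by
    rw [PySem.List.length_sorted]; omega
  have e3 : pvSel series (3 * series.length / 4)
      = (PySem.List.sorted series (fun x => x) false).getD (3 * series.length / 4) 0 :=
    pvSel_eq series.length series _ le_rfl (by omega)
  have e1 : pvSel series (series.length / 4)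
      = (PySem.List.sorted series (fun x => x) false).getD (series.length / 4) 0 :=
    pvSel_eq series.length series _ le_rfl (by omega)
  simp only [PySem.List.pyGet?_ofNat _ _ h34, PySem.List.pyGet?_ofNat _ _ h14,
    e3, e1, List.getD_eq_getElem _ _ h34, List.getD_eq_getElem _ _ h14]
  rw [pv_foldl_pair]
  simp
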